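-- pv_equiv track=rewrite | github.com/maubmz/ProyectosPc | PythonEscuela/Proyecto/MetodoPrueba.py | generar_llaves
-- ===== SOURCE A (Python) =====
-- from itertools import product
--
-- def generar_llaves(letras):
--     posiciones_x = [i for i, letra in enumerate(letras) if letra == 'X']
--
--     for combinacion in product("abcdefghijklmnopqrstuvwxyzäöüß", repeat=len(posiciones_x)):
--         # Verificar que ninguna letra se repita más de dos veces
--         if all(combinacion.count(letra) <= 2 for letra in set(combinacion)):
--             llave = list(letras)
--             for i, posicion in enumerate(posiciones_x):
--                 llave[posicion] = combinacion[i]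
--
--             yield ''.join(llave)
-- ===== SOURCE B (Python) =====
-- # Backtracking over the 'X' slots only: split the template on 'X' once, then choose a letter
-- # per slot with live per-letter counts, pruning any branch that would use a letter a third
-- # time; keys come out in the same lexicographic order as exhaustive enumeration + filtering.
-- def generar_llaves(letras):
--     alphabet = "abcdefghijklmnopqrstuvwxyz\u00e4\u00f6\u00fc\u00df"
--     pieces = letras.split('X')
--     last = len(pieces) - 1
--     counts = {}
--
--     def rec(j, prefix):
--         if j == last:
--             yield prefix + pieces[j]
--             return
--         base = prefix + pieces[j]
--         for a in alphabet:
--             ca = counts.get(a, 0)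
--             if ca < 2:
--                 counts[a] = ca + 1
--                 yield from rec(j + 1, base + a)
--                 counts[a] = ca
--
--     yield from rec(0, '')
-- ===== Notes on version B (the rewrite author's own statement) =====
-- stated objective: faster
-- what changed: A enumerates all 30^k alphabet tuples with itertools.product, filters each by counting letters and rebuilds a full character list per candidate; B splits the template on the placeholder character once and backtracks over the k slots with a live per-letter count dict, pruning any branch that would use a letter a third time, emitting keys in the same lexicographic order.
import Mathlib
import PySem

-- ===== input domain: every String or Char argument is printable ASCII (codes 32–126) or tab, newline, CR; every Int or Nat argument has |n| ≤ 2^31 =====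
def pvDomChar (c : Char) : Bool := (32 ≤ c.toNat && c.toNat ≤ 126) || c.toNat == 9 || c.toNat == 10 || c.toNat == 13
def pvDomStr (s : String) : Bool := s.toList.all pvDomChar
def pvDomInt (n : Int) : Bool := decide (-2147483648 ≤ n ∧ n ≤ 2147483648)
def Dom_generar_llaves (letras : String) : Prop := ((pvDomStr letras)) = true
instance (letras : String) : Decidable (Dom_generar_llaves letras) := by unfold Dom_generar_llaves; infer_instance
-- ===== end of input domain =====

-- B replaces A's exhaustive product-then-filter enumeration by splitting the template at the
-- placeholder character and backtracking over the slots with live per-letter counts, pruning branches that would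
-- use a letter a third time.
-- Both Pythons are generators; the equivalence is about the list of yielded keys.

-- ===== PORT A =====

-- "abcdefghijklmnopqrstuvwxyzäöüß"
def pvAlpha : List Char :=
  ['a','b','c','d','e','f','g','h','i','j','k','l','m','n','o','p','q','r','s','t',
   'u','v','w','x','y','z','ä','ö','ü','ß']

-- itertools.product(pvAlpha, repeat=k): tuples in lexicographic order, rightmost varies fastest
def pvProdA : Nat → List (List Char)
  | 0 => [[]]
  | k + 1 => pvAlpha.flatMap (fun a => (pvProdA k).map (fun t => a :: t))

-- 'llave = list(letras); for i, posicion in enumerate(posiciones_x): llave[posicion] = combinacion[i]'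
-- iterating (i, posicion) and reading combinacion[i] performs the same assignments, in the same
-- order, as iterating over posiciones_x.zip combinacion (the two lists have equal length).
def pvFillA (letras : List Char) (pos : List Int) (comb : List Char) : List Char :=
  (pos.zip comb).foldl (fun llave pc => PySem.List.pySetD llave pc.1 pc.2) letras

def generar_llaves (letras : String) : List String :=
  let xs := letras.toList
  let posiciones_x : List Int :=
    ((PySem.List.enumerate xs).filter (fun p => p.2 == 'X')).map (·.1)
  ((pvProdA posiciones_x.length).filter
      (fun comb => (PySem.Set.ofList comb).all (fun letra => PySem.List.count comb letra ≤ 2))).map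
    (fun comb => String.ofList (pvFillA xs posiciones_x comb))   -- ''.join(llave)

-- ===== PORT B =====

-- rec(j, prefix): backtracking over the remaining pieces (j is an index in Source B, the suffix
-- pieces[j:] here); counts = live letter counts (mutate-then-undo = passing the insert down);
-- 'yield from' inside 'for a in alphabet' = flatMap, a pruned branch contributes [].
def pvAltRec : List (List Char) → List Char → PySem.Dict Char Int → List String
  | [], _, _ => []                                  -- unreachable: split() yields ≥ 1 piece
  | [p], pre, _ => [String.ofList (pre ++ p)]       -- j == last: yield prefix + pieces[j]
  | p :: q :: rest, pre, counts =>
    pvAlpha.flatMap (fun a =>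
      let ca := counts.getD a 0
      if ca < 2 then
        pvAltRec (q :: rest) (pre ++ p ++ [a]) (counts.insert a (ca + 1))
      else [])

-- letras.split('X'): single-character separator, exactly core's List.splitOn
def generar_llaves_alt (letras : String) : List String :=
  pvAltRec (List.splitOn 'X' letras.toList) [] PySem.Dict.empty

-- ===== PRECONDITION & SPEC =====
def Spec_generar_llaves (letras : String) (out : List String) : Prop := out = generar_llaves_alt letras
instance (letras : String) (out : List String) : Decidable (Spec_generar_llaves letras out) := by unfold Spec_generar_llaves; infer_instance

-- ===== CLAIM (what is proved, stated in full; the proofs are below) =====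
def Claim_equal_generar_llaves : Prop := ∀ (letras : String), Dom_generar_llaves letras → Spec_generar_llaves letras (generar_llaves letras)

-- ===== LEMMAS AND PROOFS =====

-- 0-based positions of the 'X's, structurally
def pvPosRec : List Char → List Nat
  | [] => []
  | c :: r => if c = 'X' then 0 :: (pvPosRec r).map (· + 1) else (pvPosRec r).map (· + 1)

-- structural form of the substitution: replace the 'X's left to right by the tuple
def pvFillRec : List Char → List Char → List Char
  | [], _ => []
  | c :: r, t => if c = 'X' then t.headD c :: pvFillRec r t.tail else c :: pvFillRec r t

theorem pvCastShift (ps : List Nat) (s : Int) :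
    (ps.map (· + 1)).map (fun n : Nat => (n : Int) + s) = ps.map (fun n : Nat => (n : Int) + (s + 1)) := by
  rw [List.map_map]; apply List.map_congr_left; intro n _; simp; ring

-- A's enumerate/filter/map list of 'X' positions is pvPosRec (shifted by the start)
theorem pv_pos_eq (xs : List Char) (s : Int) :
    ((PySem.List.enumerate xs s).filter (fun p => p.2 == 'X')).map (·.1)
      = (pvPosRec xs).map (fun n : Nat => (n : Int) + s) := by
  induction xs generalizing s with
  | nil => simp [PySem.List.enumerate_nil, pvPosRec]
  | cons c r ih =>
    rw [PySem.List.enumerate_cons]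
    by_cases hc : c = 'X' <;>
      simp only [pvPosRec, hc, if_true, if_false, List.filter_cons, List.map_cons,
        pvCastShift, beq_iff_eq, ih (s + 1)]; simp

-- a fold of assignments at shifted positions keeps the head
theorem pv_fold_set_shift (L : List (Nat × Char)) (c : Char) (acc : List Char) :
    (L.map (Prod.map (· + 1) id)).foldl (fun l p => l.set p.1 p.2) (c :: acc)
      = c :: L.foldl (fun l p => l.set p.1 p.2) acc := by
  induction L generalizing acc with
  | nil => rfl
  | cons p L ih => simp [ih]

-- A's in-place substitution at the 'X' positions is the structural fill
theorem pv_fill_eq (xs : List Char) (t : List Char) (ht : t.length = (pvPosRec xs).length) :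
    pvFillA xs ((pvPosRec xs).map (fun n : Nat => (n : Int))) t = pvFillRec xs t := by
  unfold pvFillA
  rw [List.zip_map_left, List.foldl_map]
  simp only [Prod.map_fst, Prod.map_snd, id_eq, PySem.List.pySetD_natCast]
  induction xs generalizing t with
  | nil => simp [pvPosRec] at ht ⊢; simp [pvFillRec]
  | cons c r ih =>
    by_cases hc : c = 'X'
    · simp only [pvPosRec, hc, if_true] at ht ⊢
      match t with
      | [] => simp at ht
      | a :: t' =>
        simp only [List.zip_cons_cons, List.foldl_cons, List.set_cons_zero]
        rw [List.zip_map_left, pv_fold_set_shift]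
        simp only [List.length_cons, List.length_map] at ht
        rw [ih t' (by omega)]
        simp [pvFillRec]
    · simp only [pvPosRec, hc, if_false] at ht ⊢
      rw [List.zip_map_left, pv_fold_set_shift]
      simp only [List.length_map] at ht
      rw [ih t (by omega)]
      simp [pvFillRec, hc]

-- one backtracking step of the counts dict = the count-bound predicate over a :: t
theorem pv_pred_step (counts : PySem.Dict Char Int) (a : Char) (t : List Char)
    (h2 : counts.getD a 0 < 2) :
    ((a :: t).all (fun b => decide (counts.getD b 0 + (((a :: t).count b : Nat) : Int) ≤ 2)))
      = (t.all (fun b => decide ((counts.insert a (counts.getD a 0 + 1)).getD b 0 + ((t.count b : Nat) : Int) ≤ 2))) := by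
  apply Bool.coe_iff_coe.mp
  simp only [List.all_eq_true, decide_eq_true_eq, List.mem_cons]
  constructor
  · intro h b hb
    rw [PySem.Dict.getD_insert]
    by_cases hba : b = a
    · subst hba
      have := h b (Or.inr hb)
      simp [List.count_cons_self] at this ⊢
      omega
    · simp only [hba, if_false]
      have := h b (Or.inr hb)
      have hcnt : List.count b (a :: t) = List.count b t := by simp [Ne.symm hba]
      rw [hcnt] at this
      exact this
  · intro h b hb
    rcases hb with rfl | hb
    · by_cases hat : b ∈ t
      · have := h b hat
        rw [PySem.Dict.getD_insert, if_pos rfl] at this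
        simp [List.count_cons_self]
        omega
      · rw [List.count_cons_self, List.count_eq_zero_of_not_mem hat]
        push_cast
        omega
    · by_cases hba : b = a
      · subst hba
        have := h b hb
        rw [PySem.Dict.getD_insert, if_pos rfl] at this
        rw [List.count_cons_self]
        push_cast at this ⊢
        omega
      · have := h b hb
        rw [PySem.Dict.getD_insert, if_neg hba] at this
        have hcnt : List.count b (a :: t) = List.count b t := by simp [Ne.symm hba]
        rw [hcnt]
        exact this

-- a non-'X' head character only moves from the first piece into the prefix
theorem pv_alt_modifyHead (ps : List (List Char)) (pre : List Char)
    (counts : PySem.Dict Char Int) (c : Char) :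
    pvAltRec (ps.modifyHead (c :: ·)) pre counts = pvAltRec ps (pre ++ [c]) counts := by
  match ps with
  | [] => rfl
  | [p] => simp [pvAltRec]
  | p :: q :: rest => simp [pvAltRec]

-- split() never returns the empty list of pieces
theorem pv_splitOn_ne_nil (l : List Char) : List.splitOn 'X' l ≠ [] := by
  simp only [List.splitOn]
  exact List.splitOnP_ne_nil _ l

-- main invariant: backtracking over the pieces is filter-then-map of the full product
theorem pv_alt_eq (xs : List Char) (pre : List Char) (counts : PySem.Dict Char Int) :
    pvAltRec (List.splitOn 'X' xs) pre counts
      = ((pvProdA (pvPosRec xs).length).filter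
          (fun t => t.all (fun a => decide (counts.getD a 0 + (t.count a : Int) ≤ 2)))).map
          (fun t => String.ofList (pre ++ pvFillRec xs t)) := by
  induction xs generalizing pre counts with
  | nil => simp [List.splitOn, pvAltRec, pvPosRec, pvProdA, pvFillRec]
  | cons c r ih =>
    by_cases hc : c = 'X'
    · subst hc
      have hsplit : List.splitOn 'X' ('X' :: r) = [] :: List.splitOn 'X' r := by
        simp [List.splitOn, List.splitOnP_cons]
      obtain ⟨q, rest, hqr⟩ : ∃ q rest, List.splitOn 'X' r = q :: rest := by
        cases h : List.splitOn 'X' r with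
        | nil => exact absurd h (pv_splitOn_ne_nil r)
        | cons q rest => exact ⟨q, rest, rfl⟩
      rw [hsplit, hqr]
      simp only [pvAltRec, pvPosRec, if_true, List.length_cons, List.length_map, pvProdA,
        List.filter_flatMap, List.map_flatMap]
      congr 1
      funext a
      rw [List.filter_map, List.map_map]
      simp only [Function.comp_def]
      by_cases h2 : counts.getD a 0 < 2
      · simp only [h2, if_true]
        rw [List.filter_congr (fun t _ => pv_pred_step counts a t h2)]
        rw [← hqr, ih (pre ++ [] ++ [a]) (counts.insert a (counts.getD a 0 + 1))]
        apply List.map_congr_left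
        intro t _
        simp [pvFillRec]
      · simp only [h2, if_false]
        rw [List.filter_eq_nil_iff.mpr]
        · simp
        · intro t _
          simp only [List.all_eq_true, decide_eq_true_eq, not_forall]
          refine ⟨a, by simp, ?_⟩
          have h3 : 1 ≤ List.count a (a :: t) := by simp
          omega
    · have hsplit : List.splitOn 'X' (c :: r) = (List.splitOn 'X' r).modifyHead (c :: ·) := by
        simp [List.splitOn, List.splitOnP_cons, hc]
      rw [hsplit, pv_alt_modifyHead, ih (pre ++ [c]) counts]
      simp only [pvPosRec, hc, if_false, List.length_map]
      apply List.map_congr_left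
      intro t _
      simp [pvFillRec, hc]

-- A's set-based repetition check = B's count-bound predicate at the empty counts
theorem pv_pred_eq (t : List Char) :
    ((PySem.Set.ofList t).all (fun letra => decide (PySem.List.count t letra ≤ 2)))
      = (t.all (fun a => decide ((PySem.Dict.empty : PySem.Dict Char Int).getD a 0 + (t.count a : Int) ≤ 2))) := by
  apply Bool.coe_iff_coe.mp
  simp only [List.all_eq_true, decide_eq_true_eq, PySem.Set.mem_ofList, PySem.List.count_eq,
    PySem.Dict.getD_empty, zero_add]
  constructor
  · intro h b hb; exact_mod_cast h b hb
  · intro h b hb; exact_mod_cast h b hb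

-- every tuple of the product has length k
theorem pv_prod_length (k : Nat) (t : List Char) (ht : t ∈ pvProdA k) : t.length = k := by
  induction k generalizing t with
  | zero => simp [pvProdA] at ht; simp [ht]
  | succ k ih =>
    simp [pvProdA, List.mem_flatMap] at ht
    obtain ⟨a, -, u, hu, rfl⟩ := ht
    simp [ih u hu]

-- ===== VERDICT (by name: the statement is the Claim_ definition above) =====
theorem generar_llaves_spec : Claim_equal_generar_llaves := by
  intro letras _
  simp only [Spec_generar_llaves, generar_llaves, generar_llaves_alt]
  have hp : ((PySem.List.enumerate letras.toList).filter (fun p => p.2 == 'X')).map (·.1)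
      = (pvPosRec letras.toList).map (fun n : Nat => (n : Int)) := by
    rw [pv_pos_eq]
    apply List.map_congr_left
    intro n _
    ring
  rw [hp, pv_alt_eq, List.length_map]
  rw [List.filter_congr (fun t _ => pv_pred_eq t)]
  apply List.map_congr_left
  intro t ht
  have hmem : t ∈ pvProdA (pvPosRec letras.toList).length := List.mem_of_mem_filter ht
  rw [pv_fill_eq letras.toList t (pv_prod_length _ t hmem)]
  simp
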